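-- pv_equiv track=rewrite | github.com/youngconnorr/class-scraper | add_onto_scraper.py | check_if_code_done
-- ===== SOURCE A (Python) =====
-- def check_if_code_done(cell_text: str, cur_class: str):
--
--     spaceNum = 0
--     cur_course = ""
--     cur_letter = 0
--     while (spaceNum < 2):
--         if cell_text.index(cur_class) + cur_letter >= len(cell_text):
--             return cur_course
--
--         if cell_text[cell_text.index(cur_class) + cur_letter] == " ":
--             spaceNum += 1
--
--         if spaceNum < 2:
--             cur_course += cell_text[cell_text.index(cur_class) + cur_letter]
--         else:
--             break
--         cur_letter += 1
--
--     return cur_course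
-- ===== SOURCE B (Python) =====
-- def check_if_code_done(cell_text: str, cur_class: str):
--     # same ValueError as A when cur_class is absent
--     rest = cell_text[cell_text.index(cur_class):]
--     first = rest.find(" ")
--     if first == -1:
--         return rest
--     second = rest.find(" ", first + 1)
--     return rest if second == -1 else rest[:second]
-- ===== Notes on version B (the rewrite author's own statement) =====
-- stated objective: faster
-- what changed: Replaces A's character-by-character loop that counts spaces and re-runs cell_text.index(cur_class) on every iteration with a single index() call, two find() calls to locate the first and second space, and one slice.
import Mathlib
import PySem

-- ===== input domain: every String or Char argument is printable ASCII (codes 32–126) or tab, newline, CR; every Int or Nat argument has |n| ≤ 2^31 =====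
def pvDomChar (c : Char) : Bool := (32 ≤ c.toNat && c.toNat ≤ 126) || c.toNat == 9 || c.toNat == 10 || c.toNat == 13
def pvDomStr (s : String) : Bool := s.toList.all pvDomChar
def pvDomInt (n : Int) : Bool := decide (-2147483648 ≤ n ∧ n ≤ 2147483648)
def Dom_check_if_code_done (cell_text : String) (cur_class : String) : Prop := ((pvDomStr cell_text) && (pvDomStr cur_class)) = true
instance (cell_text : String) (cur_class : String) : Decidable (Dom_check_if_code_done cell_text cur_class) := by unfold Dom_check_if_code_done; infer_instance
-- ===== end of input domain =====

-- B replaces A's character-by-character space-counting loop (which re-runs cell_text.index every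
-- iteration) by one index() call plus two find() calls and a slice; objective: faster.


-- ===== PORT A =====
-- the while loop of A; cell_text.index(cur_class) is re-evaluated at every use, as in the Python
def check_if_code_done_loop (ct cc : List Char) (spaceNum : Nat) (cur_course : List Char)
    (cur_letter : Nat) : List Char :=
  if spaceNum < 2 then
    if h : (ct.length : Int) ≤ PySem.Chars.find ct cc + cur_letter then cur_course
    else
      -- cell_text[cell_text.index(cur_class) + cur_letter]; in range under Pre_ (index ≥ 0)
      let ch := PySem.List.pyGetD ct (PySem.Chars.find ct cc + cur_letter) ' '
      let spaceNum' := if ch = ' ' then spaceNum + 1 else spaceNum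
      if spaceNum' < 2 then
        check_if_code_done_loop ct cc spaceNum' (cur_course ++ [ch]) (cur_letter + 1)
      else cur_course
  else cur_course
termination_by ct.length + 1 - cur_letter
decreasing_by
  have h1 := PySem.Chars.neg_one_le_find ct cc
  omega

def check_if_code_done (cell_text : String) (cur_class : String) : String :=
  String.ofList (check_if_code_done_loop cell_text.toList cur_class.toList 0 [] 0)

-- ===== PORT B =====
def check_if_code_done_alt (cell_text : String) (cur_class : String) : String :=
  let start := PySem.Str.find cell_text cur_class   -- cell_text.index(cur_class); ≥ 0 under Pre_
  let rest := PySem.Str.slice cell_text (some start) none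
  let first := PySem.Str.find rest " "
  if first = -1 then rest
  else
    let second := PySem.Str.findFrom rest " " (first + 1) none
    if second = -1 then rest
    else PySem.Str.slice rest none (some second)

-- ===== PRECONDITION & SPEC =====
-- Pre_ excludes exactly the inputs where cur_class does not occur in cell_text: there
-- cell_text.index(cur_class) raises ValueError in both A and B.
def Pre_check_if_code_done (cell_text : String) (cur_class : String) : Prop :=
  PySem.Str.isIn cur_class cell_text = true
instance (cell_text : String) (cur_class : String) : Decidable (Pre_check_if_code_done cell_text cur_class) := by unfold Pre_check_if_code_done; infer_instance

def pvWitness_check_if_code_done : String × String := ("CS 101 Intro to CS", "CS")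

def Spec_check_if_code_done (cell_text : String) (cur_class : String) (out : String) : Prop := out = check_if_code_done_alt cell_text cur_class
instance (cell_text : String) (cur_class : String) (out : String) : Decidable (Spec_check_if_code_done cell_text cur_class out) := by unfold Spec_check_if_code_done; infer_instance

-- ===== CLAIM (what is proved, stated in full; the proofs are below) =====
def Claim_equal_check_if_code_done : Prop := ∀ (cell_text : String) (cur_class : String), Dom_check_if_code_done cell_text cur_class → Pre_check_if_code_done cell_text cur_class → Spec_check_if_code_done cell_text cur_class (check_if_code_done cell_text cur_class)

-- ===== LEMMAS AND PROOFS =====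

-- the pure content of A's loop on the tail of the string: copy chars until the second space
def pvGo : List Char → Nat → List Char
  | [], _ => []
  | c :: r, n =>
    let n' := if c = ' ' then n + 1 else n
    if n' < 2 then c :: pvGo r n' else []

lemma pvGo_no_space {l : List Char} (h : ' ' ∉ l) {n : Nat} (hn : n < 2) : pvGo l n = l := by
  induction l with
  | nil => rfl
  | cons c r ih =>
    have hc : c ≠ ' ' := fun hc => h (hc ▸ List.mem_cons_self)
    simp only [pvGo, hc]
    simp [hn, ih (fun hm => h (List.mem_cons_of_mem _ hm))]

lemma pvGo_one (l : List Char) : pvGo l 1 = l.takeWhile (· ≠ ' ') := by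
  induction l with
  | nil => rfl
  | cons c r ih =>
    by_cases hc : c = ' '
    · subst hc; simp [pvGo, List.takeWhile]
    · simp [pvGo, hc, List.takeWhile, ih]

lemma pvGo_split {t : List Char} (h : ' ' ∉ t) (r : List Char) :
    pvGo (t ++ ' ' :: r) 0 = t ++ ' ' :: pvGo r 1 := by
  induction t with
  | nil => simp [pvGo]
  | cons c t ih =>
    have hc : c ≠ ' ' := fun hc => h (hc ▸ List.mem_cons_self)
    simp only [List.cons_append, pvGo, hc]
    simp [hc, ih (fun hm => h (List.mem_cons_of_mem _ hm))]

lemma pvDrop_takeWhile (p : Char → Bool) (l : List Char) :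
    l.drop (l.takeWhile p).length = l.dropWhile p := by
  induction l with
  | nil => rfl
  | cons c r ih =>
    by_cases hc : p c
    · simp [List.takeWhile, List.dropWhile, hc, ih]
    · simp [List.takeWhile, List.dropWhile, hc]

-- s.find(c) for a single character: -1 if absent, else the length of the non-c prefix
lemma pvFindGo_singleton (c : Char) (l : List Char) (k : Nat) :
    PySem.Chars.find.go [c] l k =
      if c ∈ l then ((k + (l.takeWhile (· ≠ c)).length : Nat) : Int) else -1 := by
  induction l generalizing k with
  | nil => simp [PySem.Chars.find.go]
  | cons h t ih =>
    by_cases hc : c = h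
    · subst hc
      simp [PySem.Chars.find.go, List.isPrefixOf, List.takeWhile]
    · have hpre : ¬ [c].isPrefixOf (h :: t) = true := by
        simp [List.isPrefixOf]; exact fun hch => hc hch
      simp only [PySem.Chars.find.go, hpre, ih]
      have hne : (h ≠ c) = True := by simp [Ne.symm hc]
      by_cases hm : c ∈ t
      · simp [List.mem_cons, hm, List.takeWhile, hne]
        omega
      · simp [List.mem_cons, hm, hc]

lemma pvFind_singleton (c : Char) (l : List Char) :
    PySem.Chars.find l [c] =
      if c ∈ l then (((l.takeWhile (· ≠ c)).length : Nat) : Int) else -1 := by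
  have := pvFindGo_singleton c l 0
  simpa [PySem.Chars.find] using this

lemma pvLoop_eq_go (ct cc : List Char) (hfind : 0 ≤ PySem.Chars.find ct cc)
    (n : Nat) (acc : List Char) (cl : Nat) (hn : n < 2) :
    check_if_code_done_loop ct cc n acc cl =
      acc ++ pvGo (ct.drop ((PySem.Chars.find ct cc).toNat + cl)) n := by
  fun_induction check_if_code_done_loop ct cc n acc cl with
  | case1 n acc cl h1 h2 =>
    have hge : ct.length ≤ (PySem.Chars.find ct cc).toNat + cl := by omega
    simp [List.drop_eq_nil_of_le hge, pvGo]
  | case2 n acc cl h1 h2 ch sp h3 ih =>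
    have hp : (PySem.Chars.find ct cc).toNat + cl < ct.length := by omega
    have hch : ch = ct[(PySem.Chars.find ct cc).toNat + cl] := by
      show PySem.List.pyGetD ct _ ' ' = _
      rw [PySem.List.pyGetD_eq_getElem ct ' ' (by omega) (by omega)]
      congr 1
      omega
    have hsp : sp = if ch = ' ' then n + 1 else n := rfl
    rw [List.drop_eq_getElem_cons hp, ih h3]
    simp only [pvGo, ← hch, ← hsp, h3, if_pos]
    rw [show (PySem.Chars.find ct cc).toNat + (cl + 1)
        = (PySem.Chars.find ct cc).toNat + cl + 1 by omega]
    simp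
  | case3 n acc cl h1 h2 ch sp h3 =>
    have hp : (PySem.Chars.find ct cc).toNat + cl < ct.length := by omega
    have hch : ch = ct[(PySem.Chars.find ct cc).toNat + cl] := by
      show PySem.List.pyGetD ct _ ' ' = _
      rw [PySem.List.pyGetD_eq_getElem ct ' ' (by omega) (by omega)]
      congr 1
      omega
    have hsp : sp = if ch = ' ' then n + 1 else n := rfl
    rw [List.drop_eq_getElem_cons hp]
    simp only [pvGo, ← hch, ← hsp, h3]
    simp
  | case4 n acc cl h1 => omega


-- B's string-level computation, reduced to pvGo on the tail after the found index
lemma pvAlt_eq (ct cc : String) (hpre : Pre_check_if_code_done ct cc) :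
    (check_if_code_done_alt ct cc).toList
      = pvGo (ct.toList.drop (PySem.Chars.find ct.toList cc.toList).toNat) 0 := by
  have hinf := (PySem.Str.isIn_iff_infix cc ct).mp hpre
  have hf0 : 0 ≤ PySem.Str.find ct cc := (PySem.Str.find_nonneg_iff ct cc).mpr hinf
  set l := ct.toList.drop (PySem.Chars.find ct.toList cc.toList).toNat with hldef
  have hrest : (PySem.Str.slice ct (some (PySem.Str.find ct cc)) none).toList = l := by
    rw [PySem.Str.toList_slice, PySem.Chars.slice_eq_listSlice,
      PySem.List.slice_from _ hf0, PySem.Str.find_eq, hldef]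
  have hws : (" " : String).toList = [' '] := rfl
  have hfirst : PySem.Str.find (PySem.Str.slice ct (some (PySem.Str.find ct cc)) none) " "
      = PySem.Chars.find l [' '] := by
    rw [PySem.Str.find_eq, hrest, hws]
  simp only [check_if_code_done_alt, hfirst]
  by_cases hsp : ' ' ∈ l
  · set tw := l.takeWhile (· ≠ ' ') with htw
    have hfl : PySem.Chars.find l [' '] = ((tw.length : Nat) : Int) := by
      rw [pvFind_singleton, if_pos hsp]
    have hnotw : ' ' ∉ tw := fun hm => by simpa using List.mem_takeWhile_imp hm
    have hdwne : l.dropWhile (· ≠ ' ') ≠ [] := by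
      rw [Ne, List.dropWhile_eq_nil_iff]
      intro hall
      exact absurd (hall ' ' hsp) (by simp)
    have hlen : tw.length < l.length := by
      by_contra hge
      have : l.drop tw.length = [] := List.drop_eq_nil_of_le (by omega)
      rw [pvDrop_takeWhile] at this
      exact hdwne this
    have hdw : l.dropWhile (· ≠ ' ') = l[tw.length] :: l.drop (tw.length + 1) := by
      rw [← pvDrop_takeWhile, ← htw]
      exact List.drop_eq_getElem_cons hlen
    have hgl : l[tw.length] = ' ' := by
      have h := List.head_dropWhile_not (p := fun x => decide (x ≠ ' ')) (w := hdwne)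
      simp only [hdw, List.head_cons] at h
      simpa using h
    set r := l.drop (tw.length + 1) with hrdef
    have hl : l = tw ++ ' ' :: r := by
      conv_lhs => rw [← List.takeWhile_append_dropWhile (p := fun x => decide (x ≠ ' ')) (l := l)]
      rw [hdw, hgl]
    have hAside : pvGo l 0 = tw ++ ' ' :: pvGo r 1 := by
      rw [hl]
      exact pvGo_split hnotw r
    have hfne : ¬ ((tw.length : Int) = -1) := by omega
    have hsecond : PySem.Str.findFrom (PySem.Str.slice ct (some (PySem.Str.find ct cc)) none)
        " " ((tw.length : Int) + 1) none = PySem.Chars.findFrom l [' '] ((tw.length + 1 : Nat) : Int) := by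
      rw [PySem.Str.findFrom_eq, hrest, hws]
      norm_num
    have hffrom := PySem.Chars.findFrom_natCast l [' '] (tw.length + 1) (by omega)
    by_cases hsr : ' ' ∈ r
    · set tr := r.takeWhile (· ≠ ' ') with htr
      have hfr : PySem.Chars.find (l.drop (tw.length + 1)) [' '] = ((tr.length : Nat) : Int) := by
        rw [← hrdef, pvFind_singleton, if_pos hsr]
      have hsec : PySem.Chars.findFrom l [' '] ((tw.length + 1 : Nat) : Int)
          = ((tw.length + 1 + tr.length : Nat) : Int) := by
        rw [hffrom, hfr]
        simp only [if_neg (by omega : ¬ ((tr.length : Nat) : Int) = -1)]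
        push_cast
        ring
      rw [hfl, if_neg hfne, hsecond, hsec, if_neg (by omega : ¬ ((tw.length + 1 + tr.length : Nat) : Int) = -1)]
      rw [PySem.Str.toList_slice, PySem.Chars.slice_eq_listSlice, hrest,
        PySem.List.slice_to _ (by omega : (0:Int) ≤ ((tw.length + 1 + tr.length : Nat) : Int))]
      rw [Int.toNat_natCast, hAside, pvGo_one, ← htr]
      conv_lhs => rw [hl]
      rw [List.take_append, List.take_of_length_le (by omega),
        show tw.length + 1 + tr.length - tw.length = tr.length + 1 by omega,
        List.take_succ_cons]
      rw [← List.prefix_iff_eq_take.mp (List.takeWhile_prefix _), htr]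
    · have hfr : PySem.Chars.find (l.drop (tw.length + 1)) [' '] = -1 := by
        rw [← hrdef, pvFind_singleton, if_neg hsr]
      have hsec : PySem.Chars.findFrom l [' '] ((tw.length + 1 : Nat) : Int) = -1 := by
        rw [hffrom, hfr]
        simp
      rw [hfl, if_neg hfne, hsecond, hsec, if_pos rfl, hrest, hAside, pvGo_one]
      rw [List.takeWhile_eq_self_iff.mpr (fun x hx => by
        simp only [decide_eq_true_eq]
        exact fun hxe => hsr (hxe ▸ hx))]
      exact hl
  · have hfl : PySem.Chars.find l [' '] = -1 := by
      rw [pvFind_singleton, if_neg hsp]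
    rw [hfl, if_pos rfl, hrest]
    exact (pvGo_no_space hsp (by omega)).symm


-- ===== VERDICT (by name: the statement is the Claim_ definition above) =====
theorem check_if_code_done_spec : Claim_equal_check_if_code_done := by
  intro ct cc _hdom hpre
  unfold Spec_check_if_code_done
  have hinf := (PySem.Str.isIn_iff_infix cc ct).mp hpre
  have hf0 : 0 ≤ PySem.Chars.find ct.toList cc.toList := by
    have := (PySem.Str.find_nonneg_iff ct cc).mpr hinf
    rwa [PySem.Str.find_eq] at this
  unfold check_if_code_done
  rw [pvLoop_eq_go ct.toList cc.toList hf0 0 [] 0 (by omega)]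
  rw [← String.toList_inj, String.toList_ofList, pvAlt_eq ct cc hpre]
  simp
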